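-- pv_equiv track=rewrite | github.com/lotok14/advent-of-code-2023 | day3.py | get_parts
-- ===== SOURCE A (Python) =====
-- def get_parts(grid):
--     number_parts = []
--     numbers = "1,2,3,4,5,6,7,8,9,0".split(",")
--     for y in range(len(grid)):
--         for x in range(len(grid[y])):
--             if(grid[y][x] in numbers):
--                 if(x == 0):
--                     number_parts.append([x, y])
--                 elif(grid[y][x-1] not in numbers):
--                     number_parts.append([x, y])
--     return number_parts
-- ===== SOURCE B (Python) =====
-- def get_parts(grid):
--     digits = {"1", "2", "3", "4", "5", "6", "7", "8", "9", "0"}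
--     parts = []
--     for y, row in enumerate(grid):
--         x, n = 0, len(row)
--         while x < n:
--             if row[x] in digits:
--                 parts.append([x, y])
--                 x += 1
--                 while x < n and row[x] in digits:
--                     x += 1
--             else:
--                 x += 1
--     return parts
-- ===== Notes on version B (the rewrite author's own statement) =====
-- stated objective: alternative
-- what changed: B replaces A's per-cell backward peek (re-testing whether the previous cell is a digit at every position) with a run-skipping scan: when a digit cell is found it records the start and advances past the whole digit run, so each cell's digit test is done once and no x-1 lookup is needed.
import Mathlib
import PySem

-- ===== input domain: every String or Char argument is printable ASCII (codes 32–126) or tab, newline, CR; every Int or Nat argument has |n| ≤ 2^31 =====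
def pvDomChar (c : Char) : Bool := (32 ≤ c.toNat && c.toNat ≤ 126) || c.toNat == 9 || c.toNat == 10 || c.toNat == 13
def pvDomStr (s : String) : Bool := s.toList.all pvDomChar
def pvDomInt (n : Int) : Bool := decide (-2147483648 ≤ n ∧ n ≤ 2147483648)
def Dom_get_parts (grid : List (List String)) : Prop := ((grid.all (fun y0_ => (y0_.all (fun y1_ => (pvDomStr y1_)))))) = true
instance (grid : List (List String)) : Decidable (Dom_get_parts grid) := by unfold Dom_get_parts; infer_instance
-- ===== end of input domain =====

-- B replaces A's per-cell backward peek with a run-skipping scan that records each digit run's start; alternative structure, same cost.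


-- ===== PORT A =====
def get_parts (grid : List (List String)) : List (List Int) :=
  let numbers : List String := (PySem.Str.split? "1,2,3,4,5,6,7,8,9,0" ",").getD []
  (PySem.List.pyRange 0 grid.length 1).foldl (fun number_parts y =>
    let row := PySem.List.pyGetD grid y []
    (PySem.List.pyRange 0 row.length 1).foldl (fun np x =>
      if numbers.contains (PySem.List.pyGetD row x "") then
        if x = 0 then np ++ [[x, y]]
        else if ¬ numbers.contains (PySem.List.pyGetD row (x - 1) "") then np ++ [[x, y]]
        else np
      else np) number_parts) []

-- ===== PORT B =====
def pvDigits : List String := ["1", "2", "3", "4", "5", "6", "7", "8", "9", "0"]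

mutual
-- outer while loop, not currently inside a digit run
def pvScan (y : Int) : List String → Int → List (List Int)
  | [], _ => []
  | c :: rest, x =>
      if pvDigits.contains c then [x, y] :: pvSkip y rest (x + 1)
      else pvScan y rest (x + 1)
-- inner while loop: skip the remainder of the digit run
def pvSkip (y : Int) : List String → Int → List (List Int)
  | [], _ => []
  | c :: rest, x =>
      if pvDigits.contains c then pvSkip y rest (x + 1)
      else pvScan y rest (x + 1)
end

def get_parts_alt (grid : List (List String)) : List (List Int) :=
  (PySem.List.enumerate grid 0).foldl (fun parts p => parts ++ pvScan p.1 p.2 0) []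

-- ===== PRECONDITION & SPEC =====
def Spec_get_parts (grid : List (List String)) (out : List (List Int)) : Prop := out = get_parts_alt grid
instance (grid : List (List String)) (out : List (List Int)) : Decidable (Spec_get_parts grid out) := by unfold Spec_get_parts; infer_instance

-- ===== CLAIM (what is proved, stated in full; the proofs are below) =====
def Claim_equal_get_parts : Prop := ∀ (grid : List (List String)), Dom_get_parts grid → Spec_get_parts grid (get_parts grid)

-- ===== LEMMAS AND PROOFS =====

theorem pvNumbers_eq : (PySem.Str.split? "1,2,3,4,5,6,7,8,9,0" ",").getD [] = pvDigits := by decide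

-- A's inner loop from index a, with the "previous cell is a digit" state read off row, equals B's run scan of the remaining row
theorem inner_eq (y : Int) (row : List String) :
    ∀ (k a : Nat) (acc : List (List Int)), row.length = a + k →
    (PySem.List.pyRange (a : Int) (row.length : Int) 1).foldl (fun np x =>
      if pvDigits.contains (PySem.List.pyGetD row x "") then
        if x = 0 then np ++ [[x, y]]
        else if ¬ pvDigits.contains (PySem.List.pyGetD row (x - 1) "") then np ++ [[x, y]]
        else np
      else np) acc
    = acc ++ (if a ≠ 0 ∧ pvDigits.contains (row.getD (a - 1) "") then
                pvSkip y (row.drop a) (a : Int)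
              else pvScan y (row.drop a) (a : Int)) := by
  intro k
  induction k with
  | zero =>
      intro a acc ha
      have h1 : PySem.List.pyRange (a : Int) (row.length : Int) 1 = [] :=
        PySem.List.pyRange_one_eq_nil (by omega)
      have h2 : row.drop a = [] := List.drop_eq_nil_of_le (by omega)
      rw [h1, h2]
      by_cases hc : a ≠ 0 ∧ pvDigits.contains (row.getD (a - 1) "") = true
      · rw [if_pos hc, pvSkip]; simp
      · rw [if_neg hc, pvScan]; simp
  | succ k ih =>
      intro a acc ha
      have hlt : a < row.length := by omega
      have hcons : PySem.List.pyRange (a : Int) (row.length : Int) 1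
          = (a : Int) :: PySem.List.pyRange ((a : Int) + 1) (row.length : Int) 1 :=
        PySem.List.pyRange_one_cons (by exact_mod_cast hlt)
      have hget : PySem.List.pyGetD row (a : Int) "" = row[a] := by
        simp [List.getD_eq_getElem?_getD, List.getElem?_eq_getElem hlt]
      have hdrop : row.drop a = row[a] :: row.drop (a + 1) := List.drop_eq_getElem_cons hlt
      have hcast : ((a : Int) + 1) = ((a + 1 : Nat) : Int) := by push_cast; ring
      have hprev1 : row.getD (a + 1 - 1) "" = row[a] := by
        simp [List.getD_eq_getElem?_getD, List.getElem?_eq_getElem hlt]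
      rw [hcons]
      simp only [List.foldl_cons, hget]
      by_cases hd : pvDigits.contains row[a] = true
      · rw [if_pos hd]
        by_cases h0 : (a : Int) = 0
        · have ha0 : a = 0 := by exact_mod_cast h0
          rw [if_pos h0, if_neg (by simp [ha0]), hdrop]
          simp only [pvScan]
          rw [if_pos hd, hcast, ih (a + 1) _ (by omega),
              if_pos (show a + 1 ≠ 0 ∧ pvDigits.contains (row.getD (a + 1 - 1) "") = true from
                ⟨Nat.succ_ne_zero a, by rw [hprev1]; exact hd⟩)]
          simp
        · have ha0 : a ≠ 0 := fun h => h0 (by simp [h])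
          have hprevget : PySem.List.pyGetD row ((a : Int) - 1) "" = row.getD (a - 1) "" := by
            rw [show ((a : Int) - 1) = ((a - 1 : Nat) : Int) by omega]
            simp
          rw [if_neg h0, hprevget]
          by_cases hp : pvDigits.contains (row.getD (a - 1) "") = true
          · rw [if_neg (not_not_intro hp), if_pos ⟨ha0, hp⟩, hdrop]
            simp only [pvSkip]
            rw [if_pos hd, hcast, ih (a + 1) _ (by omega),
                if_pos (show a + 1 ≠ 0 ∧ pvDigits.contains (row.getD (a + 1 - 1) "") = true from
                  ⟨Nat.succ_ne_zero a, by rw [hprev1]; exact hd⟩)]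
          · rw [if_pos hp, if_neg (fun h => hp h.2), hdrop]
            simp only [pvScan]
            rw [if_pos hd, hcast, ih (a + 1) _ (by omega),
                if_pos (show a + 1 ≠ 0 ∧ pvDigits.contains (row.getD (a + 1 - 1) "") = true from
                  ⟨Nat.succ_ne_zero a, by rw [hprev1]; exact hd⟩)]
            simp
      · rw [if_neg hd]
        by_cases hc : a ≠ 0 ∧ pvDigits.contains (row.getD (a - 1) "") = true
        · rw [if_pos hc, hdrop]
          simp only [pvSkip]
          rw [if_neg hd, hcast, ih (a + 1) _ (by omega),
              if_neg (fun h => hd (by rw [hprev1] at h; exact h.2))]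
        · rw [if_neg hc, hdrop]
          simp only [pvScan]
          rw [if_neg hd, hcast, ih (a + 1) _ (by omega),
              if_neg (fun h => hd (by rw [hprev1] at h; exact h.2))]

-- A's outer loop from row a equals B's enumerate fold over the remaining rows
theorem outer_eq (grid : List (List String)) :
    ∀ (k a : Nat) (acc : List (List Int)), grid.length = a + k →
    (PySem.List.pyRange (a : Int) (grid.length : Int) 1).foldl (fun number_parts y =>
      let row := PySem.List.pyGetD grid y []
      (PySem.List.pyRange 0 (row.length : Int) 1).foldl (fun np x =>
        if pvDigits.contains (PySem.List.pyGetD row x "") then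
          if x = 0 then np ++ [[x, y]]
          else if ¬ pvDigits.contains (PySem.List.pyGetD row (x - 1) "") then np ++ [[x, y]]
          else np
        else np) number_parts) acc
    = (PySem.List.enumerate (grid.drop a) (a : Int)).foldl (fun parts p => parts ++ pvScan p.1 p.2 0) acc := by
  intro k
  induction k with
  | zero =>
      intro a acc ha
      have h1 : PySem.List.pyRange (a : Int) (grid.length : Int) 1 = [] :=
        PySem.List.pyRange_one_eq_nil (by omega)
      have h2 : grid.drop a = [] := List.drop_eq_nil_of_le (by omega)
      simp [h1, h2]
  | succ k ih =>
      intro a acc ha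
      have hlt : a < grid.length := by omega
      have hcons : PySem.List.pyRange (a : Int) (grid.length : Int) 1
          = (a : Int) :: PySem.List.pyRange ((a : Int) + 1) (grid.length : Int) 1 :=
        PySem.List.pyRange_one_cons (by exact_mod_cast hlt)
      have hget : PySem.List.pyGetD grid (a : Int) [] = grid[a] := by
        simp [List.getD_eq_getElem?_getD, List.getElem?_eq_getElem hlt]
      have hdrop : grid.drop a = grid[a] :: grid.drop (a + 1) := List.drop_eq_getElem_cons hlt
      have hcast : ((a : Int) + 1) = ((a + 1 : Nat) : Int) := by push_cast; ring
      rw [hcons]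
      simp only [List.foldl_cons, hget]
      have hin := inner_eq (a : Int) grid[a] grid[a].length 0 acc (by omega)
      simp only [Nat.cast_zero, ne_eq, not_true_eq_false, false_and, if_false, List.drop_zero] at hin
      rw [hin, hcast, ih (a + 1) _ (by omega), hdrop, PySem.List.enumerate_cons]
      simp only [List.foldl_cons]
      rw [hcast]

-- ===== VERDICT (by name: the statement is the Claim_ definition above) =====
theorem get_parts_spec : Claim_equal_get_parts := by
  intro grid _
  unfold Spec_get_parts get_parts get_parts_alt
  rw [pvNumbers_eq]
  simpa using outer_eq grid grid.length 0 [] (by omega)
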